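-- pv_equiv track=rewrite | github.com/QuantumMatter/BDD-Rank-Assignment | src/rank_order_assignment/dual_hungarian.py | extract_match
-- ===== SOURCE A (Python) =====
-- from collections import defaultdict
--
-- def extract_match(matching, num_doctors, hospital_slots):
--     """
--     Convert 'matching' (length = num_cols) mapping column->row into
--     - match_list: List[(doctor_id, hospital_id)]
--     - by_hospital: Dict[hospital_id, List[doctor_id]]
--     Filters out any padding matches beyond original doctors/slots.
--     """
--     match_list = []
--     by_hospital = defaultdict(list)
--     num_slots = len(hospital_slots)
--     for col, row in enumerate(matching):
--         if row == -1:
--             continue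
--         if row >= num_doctors or col >= num_slots:
--             # padding introduced by the internal square padding
--             continue
--         h, _ = hospital_slots[col]
--         match_list.append((int(row), int(h)))
--         by_hospital[int(h)].append(int(row))
--     match_list.sort(key=lambda x: x[0])
--     # sort doctor lists per hospital for readability
--     for h in list(by_hospital.keys()):
--         by_hospital[h] = sorted(by_hospital[h])
--     return match_list, dict(by_hospital)
-- ===== SOURCE B (Python) =====
-- def extract_match(matching, num_doctors, hospital_slots):
--     """Same conversion, by a different decomposition: build the filtered
--     (doctor, hospital) pair list once via a comprehension, sort it once by
--     doctor id, and build by_hospital keyed in first-occurrence order with each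
--     value computed directly as the sorted doctor list for that hospital."""
--     num_slots = len(hospital_slots)
--     pairs = [(int(r), int(hospital_slots[c][0]))
--              for c, r in enumerate(matching)
--              if r != -1 and r < num_doctors and c < num_slots]
--     match_list = sorted(pairs, key=lambda x: x[0])
--     by_hospital = {}
--     for _, h in pairs:
--         if h not in by_hospital:
--             by_hospital[h] = sorted(r for r, h2 in pairs if h2 == h)
--     return match_list, by_hospital
-- ===== Notes on version B (the rewrite author's own statement) =====
-- stated objective: alternative
-- what changed: Replaces A's single accumulate-into-defaultdict loop plus per-hospital sort loop with: one comprehension building the filtered pair list, one global sort by doctor id, and a grouping pass that emits each hospital's already-complete sorted doctor list at its first occurrence (no defaultdict, no per-key sorting loop).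
import Mathlib
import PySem

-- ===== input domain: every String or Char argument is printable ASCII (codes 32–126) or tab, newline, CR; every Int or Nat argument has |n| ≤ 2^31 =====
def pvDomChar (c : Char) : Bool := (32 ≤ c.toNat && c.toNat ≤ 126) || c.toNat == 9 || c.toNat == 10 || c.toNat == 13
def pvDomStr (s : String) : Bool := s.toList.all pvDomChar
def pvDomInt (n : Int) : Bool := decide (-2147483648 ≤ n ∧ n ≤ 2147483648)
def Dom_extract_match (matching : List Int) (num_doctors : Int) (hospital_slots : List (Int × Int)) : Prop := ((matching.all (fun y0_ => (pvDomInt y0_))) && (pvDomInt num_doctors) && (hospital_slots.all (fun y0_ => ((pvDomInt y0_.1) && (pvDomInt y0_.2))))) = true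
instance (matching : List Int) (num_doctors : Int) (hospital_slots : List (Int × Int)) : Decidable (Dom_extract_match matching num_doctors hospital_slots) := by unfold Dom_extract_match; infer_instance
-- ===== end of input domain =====

-- B replaces A's accumulate-into-defaultdict loop plus per-hospital sort loop by one filtered
-- comprehension, one global sort by doctor id, and a first-occurrence grouping pass (alternative
-- decomposition, same cost class).

-- ===== PORT A =====
-- hospital_slots[col] is guarded by col < num_slots, so the .getD default (0, 0) is never used
def extract_match (matching : List Int) (num_doctors : Int) (hospital_slots : List (Int × Int)) : (List (Int × Int)) × (List (Int × List Int)) :=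
  let num_slots : Int := hospital_slots.length
  let st := (PySem.List.enumerate matching 0).foldl
    (fun (st : List (Int × Int) × PySem.Dict Int (List Int)) cr =>
      if cr.2 == -1 then st
      else if decide (num_doctors ≤ cr.2) || decide (num_slots ≤ cr.1) then st
      else
        let h := ((PySem.List.pyGet? hospital_slots cr.1).getD (0, 0)).1
        (st.1 ++ [(cr.2, h)], st.2.modify h [] (· ++ [cr.2])))
    ([], PySem.Dict.empty)
  let match_list := PySem.List.sorted st.1 (fun x => x.1) false
  let by_hospital := st.2.keys.foldl
    (fun (d : PySem.Dict Int (List Int)) h => d.insert h (PySem.List.sorted (d.getD h []) (fun x => x) false)) st.2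
  (match_list, by_hospital.items)

-- ===== PORT B =====
-- index hospital_slots[c] is likewise guarded by c < num_slots
def extract_match_alt (matching : List Int) (num_doctors : Int) (hospital_slots : List (Int × Int)) : (List (Int × Int)) × (List (Int × List Int)) :=
  let num_slots : Int := hospital_slots.length
  let pairs := ((PySem.List.enumerate matching 0).filter
      (fun cr => !(cr.2 == -1) && decide (cr.2 < num_doctors) && decide (cr.1 < num_slots))).map
      (fun cr => (cr.2, ((PySem.List.pyGet? hospital_slots cr.1).getD (0, 0)).1))
  let match_list := PySem.List.sorted pairs (fun x => x.1) false
  let by_hospital := pairs.foldl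
    (fun (d : PySem.Dict Int (List Int)) p =>
      if d.contains p.2 then d
      else d.insert p.2 (PySem.List.sorted ((pairs.filter (fun q => q.2 == p.2)).map (fun q => q.1)) (fun x => x) false))
    PySem.Dict.empty
  (match_list, by_hospital.items)

-- ===== PRECONDITION & SPEC =====
def Spec_extract_match (matching : List Int) (num_doctors : Int) (hospital_slots : List (Int × Int)) (out : (List (Int × Int)) × (List (Int × List Int))) : Prop := out = extract_match_alt matching num_doctors hospital_slots
instance (matching : List Int) (num_doctors : Int) (hospital_slots : List (Int × Int)) (out : (List (Int × Int)) × (List (Int × List Int))) : Decidable (Spec_extract_match matching num_doctors hospital_slots out) := by unfold Spec_extract_match; infer_instance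

-- ===== CLAIM (what is proved, stated in full; the proofs are below) =====
def Claim_equal_extract_match : Prop := ∀ (matching : List Int) (num_doctors : Int) (hospital_slots : List (Int × Int)), Dom_extract_match matching num_doctors hospital_slots → Spec_extract_match matching num_doctors hospital_slots (extract_match matching num_doctors hospital_slots)

-- ===== LEMMAS AND PROOFS =====


-- update with already-present elements is the identity
theorem pv_update_self (s : List Int) (l : List Int) (h : ∀ x ∈ l, x ∈ s) :
    PySem.Set.update s l = s := by
  induction l generalizing s with
  | nil => rfl
  | cons a t ih =>
    rw [PySem.Set.update_cons, PySem.Set.add_of_mem (h a (by simp))]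
    exact ih s (fun x hx => h x (by simp [hx]))

-- A's per-hospital sort loop: effect on getD
theorem pv_getD_sortfold (ks : List Int) (d : PySem.Dict Int (List Int)) (hnd : ks.Nodup) (k : Int) :
    (ks.foldl (fun d h => d.insert h (PySem.List.sorted (d.getD h []) (fun x => x) false)) d).getD k []
      = if k ∈ ks then PySem.List.sorted (d.getD k []) (fun x => x) false else d.getD k [] := by
  induction ks generalizing d with
  | nil => simp
  | cons a t ih =>
    simp only [List.foldl_cons]
    rw [ih _ (List.nodup_cons.mp hnd).2]
    by_cases hk : k ∈ t
    · have hka : k ≠ a := fun h => (List.nodup_cons.mp hnd).1 (h ▸ hk)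
      simp [hk, hka, PySem.Dict.getD_insert]
    · by_cases hka : k = a
      · subst hka; simp [hk]
      · simp [hk, hka, PySem.Dict.getD_insert]

-- B's grouping loop: keys, nodup, getD
theorem pv_Bfold_keys (l : List (Int × Int)) (V : Int → List Int) (d : PySem.Dict Int (List Int)) :
    (l.foldl (fun d p => if d.contains p.2 then d else d.insert p.2 (V p.2)) d).keys
      = PySem.Set.update d.keys (l.map (fun p => p.2)) := by
  induction l generalizing d with
  | nil => rfl
  | cons p t ih =>
    simp only [List.foldl_cons, List.map_cons]
    rw [PySem.Set.update_cons]
    by_cases hc : d.contains p.2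
    · rw [if_pos hc, ih, PySem.Set.add_of_mem ((PySem.Dict.contains_iff_mem_keys d p.2).mp hc)]
    · rw [if_neg (by simp [hc]), ih,
        PySem.Dict.keys_insert_of_not_contains d (V p.2) (by simpa using hc),
        PySem.Set.add_of_not_mem (fun hm => by
          simp [(PySem.Dict.contains_iff_mem_keys d p.2).mpr hm] at hc)]

theorem pv_Bfold_nodup (l : List (Int × Int)) (V : Int → List Int) (d : PySem.Dict Int (List Int))
    (h : d.keys.Nodup) :
    (l.foldl (fun d p => if d.contains p.2 then d else d.insert p.2 (V p.2)) d).keys.Nodup := by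
  induction l generalizing d with
  | nil => exact h
  | cons p t ih =>
    simp only [List.foldl_cons]
    by_cases hc : d.contains p.2
    · rw [if_pos hc]; exact ih d h
    · rw [if_neg (by simp [hc])]
      exact ih _ (PySem.Dict.nodup_keys_insert d p.2 (V p.2) h)

theorem pv_Bfold_getD (l : List (Int × Int)) (V : Int → List Int) (d : PySem.Dict Int (List Int)) (k : Int) :
    (l.foldl (fun d p => if d.contains p.2 then d else d.insert p.2 (V p.2)) d).getD k []
      = if d.contains k then d.getD k []
        else if k ∈ l.map (fun p => p.2) then V k else d.getD k [] := by
  induction l generalizing d with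
  | nil => simp
  | cons p t ih =>
    simp only [List.foldl_cons, List.map_cons]
    by_cases hc : d.contains p.2
    · rw [if_pos hc, ih]
      by_cases hk : k = p.2
      · subst hk; simp [hc]
      · split_ifs <;> simp_all [List.mem_cons]
    · rw [if_neg (by simp [hc]), ih]
      by_cases hk : k = p.2
      · subst hk
        simp [hc]
      · have h1 : (d.insert p.2 (V p.2)).contains k = d.contains k := by
          simp [PySem.Dict.contains_insert, hk]
        have h2 : (d.insert p.2 (V p.2)).getD k [] = d.getD k [] := by
          simp [PySem.Dict.getD_insert, hk]
        rw [h1, h2]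
        split_ifs <;> simp_all [List.mem_cons]

-- a dict with nodup keys is its key list paired with its getD values
theorem pv_items_eq_aux (l : List (Int × List Int)) (h : (l.map Prod.fst).Nodup) :
    l = (l.map Prod.fst).map (fun k => (k, (PySem.Dict.mk l).getD k [])) := by
  induction l with
  | nil => rfl
  | cons p rest ih =>
    obtain ⟨k0, v0⟩ := p
    simp only [List.map_cons]
    have h' : (k0 :: rest.map Prod.fst).Nodup := by simpa using h
    have hnd := List.nodup_cons.mp h'
    have hhead : (PySem.Dict.mk ((k0, v0) :: rest)).getD k0 [] = v0 := by
      simp [PySem.Dict.getD_eq_get?_getD, PySem.Dict.get?_mk_cons]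
    have htail : ∀ k ∈ rest.map Prod.fst,
        (PySem.Dict.mk ((k0, v0) :: rest)).getD k [] = (PySem.Dict.mk rest).getD k [] := by
      intro k hk
      have hne : k0 ≠ k := fun hkk => hnd.1 (hkk ▸ hk)
      simp [PySem.Dict.getD_eq_get?_getD, PySem.Dict.get?_mk_cons, hne]
    calc (k0, v0) :: rest
        = (k0, v0) :: (rest.map Prod.fst).map (fun k => (k, (PySem.Dict.mk rest).getD k [])) := by
          rw [← ih hnd.2]
      _ = (k0, (PySem.Dict.mk ((k0, v0) :: rest)).getD k0 []) ::
            (rest.map Prod.fst).map (fun k => (k, (PySem.Dict.mk ((k0, v0) :: rest)).getD k [])) := by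
          rw [hhead]
          congr 1
          exact (List.map_congr_left (fun k hk => by rw [htail k hk])).symm

theorem pv_items_eq (d : PySem.Dict Int (List Int)) (h : d.keys.Nodup) :
    d.items = d.keys.map (fun k => (k, d.getD k [])) := by
  rcases d with ⟨l⟩
  exact pv_items_eq_aux l h

-- A's single loop, split into its two independent accumulators and re-expressed
-- over the filtered pair list
theorem pv_Afold (matching : List Int) (num_doctors : Int) (hospital_slots : List (Int × Int)) :
    ((PySem.List.enumerate matching 0).foldl
      (fun (st : List (Int × Int) × PySem.Dict Int (List Int)) cr =>
        if cr.2 == -1 then st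
        else if decide (num_doctors ≤ cr.2) || decide ((hospital_slots.length : Int) ≤ cr.1) then st
        else (st.1 ++ [(cr.2, ((PySem.List.pyGet? hospital_slots cr.1).getD (0, 0)).1)],
              st.2.modify ((PySem.List.pyGet? hospital_slots cr.1).getD (0, 0)).1 [] (· ++ [cr.2])))
      ([], PySem.Dict.empty))
    = (((PySem.List.enumerate matching 0).filter
          (fun cr => !(cr.2 == -1) && decide (cr.2 < num_doctors) && decide (cr.1 < (hospital_slots.length : Int)))).map
          (fun cr => (cr.2, ((PySem.List.pyGet? hospital_slots cr.1).getD (0, 0)).1)),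
       (((PySem.List.enumerate matching 0).filter
          (fun cr => !(cr.2 == -1) && decide (cr.2 < num_doctors) && decide (cr.1 < (hospital_slots.length : Int)))).map
          (fun cr => (cr.2, ((PySem.List.pyGet? hospital_slots cr.1).getD (0, 0)).1))).foldl
         (fun d p => d.modify p.2 [] (· ++ [p.1])) PySem.Dict.empty) := by
  have hstep : (fun (st : List (Int × Int) × PySem.Dict Int (List Int)) cr =>
        if cr.2 == -1 then st
        else if decide (num_doctors ≤ cr.2) || decide ((hospital_slots.length : Int) ≤ cr.1) then st
        else (st.1 ++ [(cr.2, ((PySem.List.pyGet? hospital_slots cr.1).getD (0, 0)).1)],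
              st.2.modify ((PySem.List.pyGet? hospital_slots cr.1).getD (0, 0)).1 [] (· ++ [cr.2])))
      = (fun (st : List (Int × Int) × PySem.Dict Int (List Int)) cr =>
          ((fun (a : List (Int × Int)) (cr : Int × Int) =>
              if !(cr.2 == -1) && decide (cr.2 < num_doctors) && decide (cr.1 < (hospital_slots.length : Int)) then
                a ++ [(cr.2, ((PySem.List.pyGet? hospital_slots cr.1).getD (0, 0)).1)] else a) st.1 cr,
           (fun (d : PySem.Dict Int (List Int)) (cr : Int × Int) =>
              if !(cr.2 == -1) && decide (cr.2 < num_doctors) && decide (cr.1 < (hospital_slots.length : Int)) then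
                d.modify ((PySem.List.pyGet? hospital_slots cr.1).getD (0, 0)).1 [] (· ++ [cr.2]) else d) st.2 cr)) := by
    funext st cr
    by_cases h1 : cr.2 = -1
    · simp [h1]
    · by_cases h2 : num_doctors ≤ cr.2
      · simp [h1, h2, not_lt.mpr h2]
      · by_cases h3 : (hospital_slots.length : Int) ≤ cr.1
        · simp [h1, h2, h3, not_lt.mpr h3, lt_of_not_ge h2]
        · simp [h1, h2, h3, lt_of_not_ge h2, lt_of_not_ge h3]
  rw [hstep, PySem.List.foldl_prod_mk
      (f := fun (a : List (Int × Int)) (cr : Int × Int) =>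
        if !(cr.2 == -1) && decide (cr.2 < num_doctors) && decide (cr.1 < (hospital_slots.length : Int)) then
          a ++ [(cr.2, ((PySem.List.pyGet? hospital_slots cr.1).getD (0, 0)).1)] else a)
      (g := fun (d : PySem.Dict Int (List Int)) (cr : Int × Int) =>
        if !(cr.2 == -1) && decide (cr.2 < num_doctors) && decide (cr.1 < (hospital_slots.length : Int)) then
          d.modify ((PySem.List.pyGet? hospital_slots cr.1).getD (0, 0)).1 [] (· ++ [cr.2]) else d),
    PySem.List.foldl_append_if, PySem.List.foldl_if_eq_foldl_filter, List.foldl_map]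
  rfl

-- the two by_hospital constructions produce the same item list
theorem pv_dicts_eq (P : List (Int × Int)) :
    ((P.foldl (fun d p => d.modify p.2 [] (· ++ [p.1])) PySem.Dict.empty).keys.foldl
        (fun (d : PySem.Dict Int (List Int)) h => d.insert h (PySem.List.sorted (d.getD h []) (fun x => x) false))
        (P.foldl (fun d p => d.modify p.2 [] (· ++ [p.1])) PySem.Dict.empty)).items
    = (P.foldl (fun d p => if d.contains p.2 then d
          else d.insert p.2 (PySem.List.sorted ((P.filter (fun q => q.2 == p.2)).map (fun q => q.1)) (fun x => x) false))
        PySem.Dict.empty).items := by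
  set V : Int → List Int := fun h =>
    PySem.List.sorted ((P.filter (fun q => q.2 == h)).map (fun q => q.1)) (fun x => x) false with hV
  set dA := P.foldl (fun d p => d.modify p.2 [] (· ++ [p.1])) PySem.Dict.empty with hdA
  have hswap : dA = (P.map Prod.swap).foldl (fun d p => d.modify p.1 [] (· ++ [p.2])) PySem.Dict.empty := by
    rw [List.foldl_map]
    simp only [Prod.fst_swap, Prod.snd_swap]
    exact hdA
  have hkeysA : dA.keys = PySem.Set.update [] (P.map (fun p => p.2)) := by
    rw [hdA]
    have h := PySem.Dict.keys_foldl_modify_key P (fun p => p.2) []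
      (fun _ p => fun l => l ++ [p.1]) PySem.Dict.empty
    simpa using h
  have hnodA : dA.keys.Nodup := by
    rw [hdA]
    exact PySem.Dict.nodup_keys_foldl_modify_key P (fun p => p.2) []
      (fun _ p => fun l => l ++ [p.1]) PySem.Dict.empty PySem.Dict.nodup_keys_empty
  have hgetA : ∀ k, dA.getD k [] = (P.filter (fun q => q.2 == k)).map (fun q => q.1) := by
    intro k
    rw [hswap, PySem.Dict.getD_foldl_modify_append]
    simp [List.filter_map, List.map_map, Function.comp_def]
  -- A's sort loop
  set dA' := dA.keys.foldl
      (fun (d : PySem.Dict Int (List Int)) h => d.insert h (PySem.List.sorted (d.getD h []) (fun x => x) false))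
      dA with hdA'
  have hkeys' : dA'.keys = dA.keys := by
    rw [hdA', PySem.Dict.keys_foldl_insert]
    exact pv_update_self _ _ (fun x hx => hx)
  have hnod' : dA'.keys.Nodup := by rw [hkeys']; exact hnodA
  have hget' : ∀ k ∈ dA.keys, dA'.getD k [] = PySem.List.sorted (dA.getD k []) (fun x => x) false := by
    intro k hk
    rw [hdA', pv_getD_sortfold _ _ hnodA, if_pos hk]
  -- B's grouping loop
  set dB := P.foldl (fun d p => if d.contains p.2 then d else d.insert p.2 (V p.2)) PySem.Dict.empty with hdB
  have hkeysB : dB.keys = PySem.Set.update [] (P.map (fun p => p.2)) := by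
    rw [hdB, pv_Bfold_keys, PySem.Dict.keys_empty]
  have hnodB : dB.keys.Nodup := by
    rw [hdB]
    exact pv_Bfold_nodup P V PySem.Dict.empty (by rw [PySem.Dict.keys_empty]; exact List.nodup_nil)
  have hgetB : ∀ k ∈ P.map (fun p => p.2), dB.getD k [] = V k := by
    intro k hk
    rw [hdB, pv_Bfold_getD, if_neg (by simp [PySem.Dict.contains_empty]), if_pos hk]
  -- assemble
  rw [pv_items_eq dA' hnod', pv_items_eq dB hnodB, hkeys', hkeysA, hkeysB]
  apply List.map_congr_left
  intro k hk
  have hkP : k ∈ P.map (fun p => p.2) := by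
    rcases (PySem.Set.mem_update [] (P.map (fun p => p.2)) k).mp hk with h | h
    · cases h
    · exact h
  have hkA : k ∈ dA.keys := by rw [hkeysA]; exact hk
  rw [hget' k hkA, hgetA k, hgetB k hkP]

theorem pv_main (matching : List Int) (num_doctors : Int) (hospital_slots : List (Int × Int)) :
    extract_match matching num_doctors hospital_slots = extract_match_alt matching num_doctors hospital_slots := by
  simp only [extract_match, extract_match_alt]
  rw [pv_Afold, pv_dicts_eq]

-- ===== VERDICT (by name: the statement is the Claim_ definition above) =====
theorem extract_match_spec : Claim_equal_extract_match := by
  intro m nd hs _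
  unfold Spec_extract_match
  exact pv_main m nd hs
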